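-- pv_equiv track=rewrite | github.com/dlkang/Final_SWE681 | game.py | grid_map
-- ===== SOURCE A (Python) =====
-- ROWS = 8
--
-- COLUMNS = 8
--
-- def grid_map(rows=ROWS, columns=COLUMNS):
--     data = []
--     xpos = 1
--     ypos = 1
--     width = 50
--     height = 50
--     for row in range(rows):
--         column_data = []
--         for column in range(columns):
--             tile = {'x': xpos,'y': ypos,'width': width, 'height': height, 'hero': 0}
--             column_data.append(tile)
--             xpos += width
--         data.append(column_data)
--         xpos = 1
--         ypos += height
--     return data
-- ===== SOURCE B (Python) =====
-- ROWS = 8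
-- COLUMNS = 8
--
-- def grid_map(rows=ROWS, columns=COLUMNS):
--     # Stage 1: the pixel coordinates come straight from arithmetic ranges.
--     ys = range(1, 1 + 50 * rows, 50)
--     if not ys:
--         return []
--     # Stage 2: build ONE template row (y left as a placeholder).
--     proto = [{'x': x, 'y': 0, 'width': 50, 'height': 50, 'hero': 0}
--              for x in range(1, 1 + 50 * columns, 50)]
--     # Stage 3: stamp the template once per row, overwriting only 'y'.
--     return [[dict(tile, y=y) for tile in proto] for y in ys]
-- ===== Notes on version B (the rewrite author's own statement) =====
-- stated objective: alternative
-- what changed: Instead of one nested pass with running xpos/ypos accumulators (reset per row), B stages the work: the coordinates come from arithmetic ranges with step 50, one template row is built once, and each grid row is produced by stamping that template with its y value via a dict merge (with an explicit empty-grid early return when there are no rows).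
import Mathlib
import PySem

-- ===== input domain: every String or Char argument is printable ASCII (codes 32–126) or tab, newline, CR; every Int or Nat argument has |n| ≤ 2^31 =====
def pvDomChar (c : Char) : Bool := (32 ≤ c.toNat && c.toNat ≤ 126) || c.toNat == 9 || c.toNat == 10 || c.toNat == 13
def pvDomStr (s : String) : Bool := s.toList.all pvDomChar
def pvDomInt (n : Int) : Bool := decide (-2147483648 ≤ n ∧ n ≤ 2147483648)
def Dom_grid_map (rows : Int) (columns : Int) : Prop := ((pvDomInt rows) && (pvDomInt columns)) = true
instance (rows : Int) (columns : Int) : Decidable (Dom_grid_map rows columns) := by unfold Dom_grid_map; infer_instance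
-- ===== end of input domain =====

-- B replaces A's single nested pass with running xpos/ypos accumulators by staged passes:
-- coordinate ranges with step 50, one template row built once, then per-row stamping of 'y' via dict merge.

-- ===== PORT A =====
-- the tile dict literal {'x': x, 'y': y, 'width': 50, 'height': 50, 'hero': 0}
def tileA (x y : Int) : List (String × Int) :=
  [("x", x), ("y", y), ("width", 50), ("height", 50), ("hero", 0)]

def grid_map (rows : Int) (columns : Int) : List (List (List (String × Int))) :=
  -- data = []; xpos = 1; ypos = 1; for row in range(rows): …
  let s := (PySem.List.pyRange 0 rows 1).foldl
    (fun (st : List (List (List (String × Int))) × Int × Int) _row =>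
      let data := st.1
      let xpos := st.2.1
      let ypos := st.2.2
      -- column_data = []; for column in range(columns): append tile; xpos += width
      let inner := (PySem.List.pyRange 0 columns 1).foldl
        (fun (st2 : List (List (String × Int)) × Int) _col =>
          (st2.1 ++ [tileA st2.2 ypos], st2.2 + 50)) ([], xpos)
      (data ++ [inner.1], 1, ypos + 50))
    ([], 1, 1)
  s.1

-- ===== PORT B =====
def grid_map_alt (rows : Int) (columns : Int) : List (List (List (String × Int))) :=
  -- ys = range(1, 1 + 50*rows, 50); if not ys: return []
  let ys := PySem.List.pyRange 1 (1 + 50 * rows) 50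
  if ys = [] then []
  else
    -- proto = [{'x': x, 'y': 0, 'width': 50, 'height': 50, 'hero': 0} for x in range(1, 1 + 50*columns, 50)]
    let proto := (PySem.List.pyRange 1 (1 + 50 * columns) 50).map (fun x =>
      [("x", x), ("y", (0 : Int)), ("width", 50), ("height", 50), ("hero", 0)])
    -- [[dict(tile, y=y) for tile in proto] for y in ys]   (dict merge = overwrite key 'y' in place)
    ys.map (fun y => proto.map (fun tile =>
      (PySem.Dict.insert (PySem.Dict.ofList tile) "y" y).items))

-- ===== PRECONDITION & SPEC =====
def Spec_grid_map (rows : Int) (columns : Int) (out : List (List (List (String × Int)))) : Prop := out = grid_map_alt rows columns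
instance (rows : Int) (columns : Int) (out : List (List (List (String × Int)))) : Decidable (Spec_grid_map rows columns out) := by unfold Spec_grid_map; infer_instance

-- ===== CLAIM =====
def Claim_equal_grid_map : Prop := ∀ (rows : Int) (columns : Int), Dom_grid_map rows columns → Spec_grid_map rows columns (grid_map rows columns)

-- ===== LEMMAS AND PROOFS =====

-- inner loop of A: accumulates the row's tiles, xpos advances by 50 per column
theorem gm_inner (m : Nat) (ypos x : Int) (cd : List (List (String × Int))) :
    (PySem.List.pyRange 0 (m : Int) 1).foldl
      (fun (st2 : List (List (String × Int)) × Int) _col =>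
        (st2.1 ++ [tileA st2.2 ypos], st2.2 + 50)) (cd, x)
    = (cd ++ (PySem.List.pyRange 0 (m : Int) 1).map (fun c => tileA (x + c * 50) ypos),
       x + m * 50) := by
  induction m generalizing cd x with
  | zero => simp [PySem.List.pyRange_one_eq_nil]
  | succ m ih =>
      rw [show (((m + 1 : Nat)) : Int) = (m : Int) + 1 by push_cast; ring,
          PySem.List.pyRange_one_succ_right (by exact_mod_cast Nat.zero_le m)]
      simp [List.foldl_append, List.map_append, ih]
      ring

-- outer loop of A: each produced row is the closed-form row at y = ypos + r*50
theorem gm_outer (k : Nat) (columns ypos : Int) (data : List (List (List (String × Int)))) :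
    (PySem.List.pyRange 0 (k : Int) 1).foldl
      (fun (st : List (List (List (String × Int))) × Int × Int) _row =>
        (st.1 ++ [((PySem.List.pyRange 0 columns 1).foldl
            (fun (st2 : List (List (String × Int)) × Int) _col =>
              (st2.1 ++ [tileA st2.2 st.2.2], st2.2 + 50)) ([], st.2.1)).1],
         1, st.2.2 + 50))
      (data, 1, ypos)
    = (data ++ (PySem.List.pyRange 0 (k : Int) 1).map (fun r =>
        (PySem.List.pyRange 0 columns 1).map (fun c => tileA (1 + c * 50) (ypos + r * 50))),
       1, ypos + k * 50) := by
  induction k generalizing data ypos with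
  | zero => simp [PySem.List.pyRange_one_eq_nil]
  | succ k ih =>
      rw [show (((k + 1 : Nat)) : Int) = (k : Int) + 1 by push_cast; ring,
          PySem.List.pyRange_one_succ_right (by exact_mod_cast Nat.zero_le k)]
      simp only [List.foldl_append, List.map_append, List.foldl_cons, List.foldl_nil, ih]
      rcases le_or_gt columns 0 with hc | hc
      · simp [PySem.List.pyRange_one_eq_nil hc]
        ring
      · have hcol := gm_inner columns.toNat (ypos + k * 50) 1 ([] : List (List (String × Int)))
        rw [Int.toNat_of_nonneg (le_of_lt hc)] at hcol
        simp [hcol]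
        ring

-- stamping the template tile overwrites 'y' in place
theorem stamp_tile (x y : Int) :
    (PySem.Dict.insert (PySem.Dict.ofList
        [("x", x), ("y", (0 : Int)), ("width", 50), ("height", 50), ("hero", 0)]) "y" y).items
    = tileA x y := by
  simp [PySem.Dict.insert, PySem.Dict.ofList, PySem.Dict.update, PySem.Dict.contains,
        PySem.Dict.empty, tileA]

-- a step-50 range from 1 is the closed-form coordinate list
theorem coord_range (n : Int) :
    PySem.List.pyRange 1 (1 + 50 * n) 50
    = (PySem.List.pyRange 0 n 1).map (fun k => 1 + k * 50) := by
  rw [PySem.List.pyRange_of_pos _ _ (by norm_num), PySem.List.pyRange_one]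
  rcases le_or_gt n 0 with h | h
  · rw [if_neg (by omega)]
    simp
    omega
  · rw [if_pos (by omega)]
    rw [show (1 + 50 * n - 1 + 50 - 1) / 50 = n by omega]
    simp [List.map_map, Function.comp]
    exact fun k _ => by ring

-- ===== VERDICT =====
theorem grid_map_spec : Claim_equal_grid_map := by
  intro rows columns _
  unfold Spec_grid_map grid_map grid_map_alt
  simp only [coord_range, List.map_map]
  rcases le_or_gt rows 0 with hr | hr
  · simp [PySem.List.pyRange_one_eq_nil hr]
  · have h := gm_outer rows.toNat columns 1 ([] : List (List (List (String × Int))))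
    rw [Int.toNat_of_nonneg (le_of_lt hr)] at h
    simp only [h, List.nil_append]
    rw [if_neg (by
      intro hnil
      have hl := congrArg List.length hnil
      simp [PySem.List.length_pyRange_one] at hl
      omega)]
    apply List.map_congr_left
    intro r _
    apply List.map_congr_left
    intro c _
    simp [Function.comp, stamp_tile, tileA]
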